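-- pv_equiv track=rewrite | github.com/adampehrson/Kattis | venv/bin/4_thought.py | arithmetic
-- ===== SOURCE A (Python) =====
-- def operator(x):
--     if x == 0:
--         return '+'
--     if x == 1:
--         return '-'
--     if x == 2:
--         return '*'
--     if x == 3:
--         return '/'
--
-- def arithmetic(target):
--
--
--
--     a = 0
--     while a < 4:
--         op = ''
--         op = op + operator(a)
--         b = 0
--         while b < 4:
--             temp1 = op + operator(b)
--             c = 0
--             while c < 4:
--                 temp = temp1 + operator(c)
--                 out = [4,temp[0],4,temp[1],4,temp[2],4]
--                 placeholder = [4,temp[0],4,temp[1],4,temp[2],4]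
--                 i = 1
--
--                 while i < len(out):
--                     if out[i] == '*':
--                         out[i-1] = out[i-1] * out[i+1]
--
--                         out.pop(i)
--                         out.pop(i)
--
--                     elif out[i] == '/':
--                         out[i-1] = out[i-1] // out[i+1]
--                         out.pop(i)
--                         out.pop(i)
--                     else:
--                         i += 2
--                 i = 1
--                 while i < len(out):
--                     if out[i] == '+':
--                         out[i-1] = out[i-1] + out[i+1]
--                         out.pop(i)
--                         out.pop(i)
--                     elif out[i] == '-':
--                         out[i-1] = out[i-1] - out[i+1]
--                         out.pop(i)
--                         out.pop(i)
--                     else: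
--                         i += 2
--
--                 if out[0] == target:
--                     equation = ''
--                     for x in placeholder:
--                         equation += str(x) + ' '
--                     equation += '= ' + str(out[0])
--                     return equation
--
--
--                 c += 1
--             b += 1
--
--         a += 1
--     return 'no solution'
-- ===== SOURCE B (Python) =====
-- def arithmetic(target):
--     ops = '+-*/'
--     for k in range(64):
--         o1, o2, o3 = ops[k // 16], ops[k // 4 % 4], ops[k % 4]
--         total, sign, term = 0, 1, 4
--         for op in (o1, o2, o3):
--             if op == '*':
--                 term *= 4
--             elif op == '/':
--                 term //= 4
--             else:
--                 total += sign * term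
--                 sign = 1 if op == '+' else -1
--                 term = 4
--         total += sign * term
--         if total == target:
--             return '4 %s 4 %s 4 %s 4 = %d' % (o1, o2, o3, total)
--     return 'no solution'
-- ===== Notes on version B (the rewrite author's own statement) =====
-- stated objective: simpler
-- what changed: Replaces A's mutate-and-pop two-phase list evaluator (building a mixed int/str list and collapsing it in place, inside three hand-written counter loops) with a flat enumeration of all operator triples decoded from one counter and a single-pass total/sign/term accumulator.
import Mathlib
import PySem

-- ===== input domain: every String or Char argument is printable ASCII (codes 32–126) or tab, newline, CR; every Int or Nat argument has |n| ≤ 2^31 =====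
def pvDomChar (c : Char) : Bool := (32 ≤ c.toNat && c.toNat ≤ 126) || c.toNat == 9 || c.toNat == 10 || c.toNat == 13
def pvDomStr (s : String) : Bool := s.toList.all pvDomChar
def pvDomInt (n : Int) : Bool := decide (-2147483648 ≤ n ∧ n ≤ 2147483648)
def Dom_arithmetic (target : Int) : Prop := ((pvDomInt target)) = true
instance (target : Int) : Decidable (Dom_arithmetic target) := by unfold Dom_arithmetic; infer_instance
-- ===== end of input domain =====

-- B replaces A's mutate-and-pop two-phase list evaluator with a single-pass
-- term-accumulation evaluator over a flat enumeration of all operator triples (objective: simpler).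
-- Strings are built as List Char and packed with String.ofList at the end (exact: ASCII literals only).


-- ===== PORT A =====

-- elements of A's mixed int/str work list [4, temp[0], 4, temp[1], 4, temp[2], 4]
inductive PItem where
  | num : Int → PItem
  | sym : Char → PItem
deriving DecidableEq, Repr

-- out[i-1]/out[i+1] at an operator position are always ints in A; default 0 is never used
def pvGetNum : PItem → Int
  | .num n => n
  | .sym _ => 0

def pvOperator (x : Int) : List Char :=
  if x = 0 then ['+']
  else if x = 1 then ['-']
  else if x = 2 then ['*']
  else ['/']  -- Python falls off (None) for other x; only ever called with 0..3

-- str(x) for an element of the placeholder list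
def pvStrItem : PItem → List Char
  | .num n => PySem.Int.toChars n
  | .sym c => [c]

-- first while loop: collapse '*' and '/' in place (pop twice = eraseIdx twice);
-- fuel = out.length bounds the iteration count (each step shrinks len - i by 2)
def pvMulDivLoop : Nat → List PItem → Nat → List PItem
  | 0, out, _ => out
  | fuel + 1, out, i =>
    if i < out.length then
      let x := out.getD i (.num 0)
      if x = .sym '*' then
        let v := pvGetNum (out.getD (i - 1) (.num 0)) * pvGetNum (out.getD (i + 1) (.num 0))
        pvMulDivLoop fuel (((out.set (i - 1) (.num v)).eraseIdx i).eraseIdx i) i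
      else if x = .sym '/' then
        let v := PySem.Int.floordiv (pvGetNum (out.getD (i - 1) (.num 0))) (pvGetNum (out.getD (i + 1) (.num 0)))
        pvMulDivLoop fuel (((out.set (i - 1) (.num v)).eraseIdx i).eraseIdx i) i
      else
        pvMulDivLoop fuel out (i + 2)
    else out

-- second while loop: collapse '+' and '-'
def pvAddSubLoop : Nat → List PItem → Nat → List PItem
  | 0, out, _ => out
  | fuel + 1, out, i =>
    if i < out.length then
      let x := out.getD i (.num 0)
      if x = .sym '+' then
        let v := pvGetNum (out.getD (i - 1) (.num 0)) + pvGetNum (out.getD (i + 1) (.num 0))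
        pvAddSubLoop fuel (((out.set (i - 1) (.num v)).eraseIdx i).eraseIdx i) i
      else if x = .sym '-' then
        let v := pvGetNum (out.getD (i - 1) (.num 0)) - pvGetNum (out.getD (i + 1) (.num 0))
        pvAddSubLoop fuel (((out.set (i - 1) (.num v)).eraseIdx i).eraseIdx i) i
      else
        pvAddSubLoop fuel out (i + 2)
    else out

-- the body of A's innermost loop for one fixed operator string temp
def pvTryTriple (temp : List Char) (target : Int) : Option (List Char) :=
  let out0 : List PItem :=
    [.num 4, .sym (temp.getD 0 ' '), .num 4, .sym (temp.getD 1 ' '),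
     .num 4, .sym (temp.getD 2 ' '), .num 4]
  let placeholder := out0
  let out1 := pvMulDivLoop out0.length out0 1
  let out2 := pvAddSubLoop out1.length out1 1
  -- out[0] == target : out[0] is an int here, compared as Int
  if pvGetNum (out2.getD 0 (.num 0)) = target then
    some ((placeholder.foldl (fun eq x => eq ++ pvStrItem x ++ [' ']) []) ++ ['=', ' ']
            ++ PySem.Int.toChars (pvGetNum (out2.getD 0 (.num 0))))
  else none

-- while c < 4 (early return via Option); fuel 4 matches the loop bound
def pvLoopC : Nat → Int → List Char → Int → Option (List Char)
  | 0, _, _, _ => none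
  | fuel + 1, c, temp1, target =>
    if c < 4 then
      match pvTryTriple (temp1 ++ pvOperator c) target with
      | some s => some s
      | none => pvLoopC fuel (c + 1) temp1 target
    else none

def pvLoopB : Nat → Int → List Char → Int → Option (List Char)
  | 0, _, _, _ => none
  | fuel + 1, b, op, target =>
    if b < 4 then
      match pvLoopC 4 0 (op ++ pvOperator b) target with
      | some s => some s
      | none => pvLoopB fuel (b + 1) op target
    else none

def pvLoopA : Nat → Int → Int → Option (List Char)
  | 0, _, _ => none
  | fuel + 1, a, target =>
    if a < 4 then
      match pvLoopB 4 0 ([] ++ pvOperator a) target with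
      | some s => some s
      | none => pvLoopA fuel (a + 1) target
    else none

def arithmetic (target : Int) : String :=
  ((pvLoopA 4 0 target).map String.ofList).getD "no solution"

-- ===== PORT B =====

def pvOps : List Char := ['+', '-', '*', '/']

-- one pass over the three operators, keeping (total, sign, current term)
def pvEvalTriple (o1 o2 o3 : Char) : Int :=
  let st := [o1, o2, o3].foldl
    (fun (st : Int × Int × Int) op =>
      let (total, sign, term) := st
      if op = '*' then (total, sign, term * 4)
      else if op = '/' then (total, sign, PySem.Int.floordiv term 4)
      else (total + sign * term, if op = '+' then 1 else -1, 4))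
    (0, 1, 4)
  st.1 + st.2.1 * st.2.2

-- k ranges over 0..63; k // 16, k // 4 % 4, k % 4 are in 0..3, so getD's ' ' is never used
def pvLoopK (ks : List Int) (target : Int) : Option (List Char) :=
  match ks with
  | [] => none
  | k :: rest =>
    let o1 := pvOps.getD (PySem.Int.floordiv k 16).toNat ' '
    let o2 := pvOps.getD (PySem.Int.mod (PySem.Int.floordiv k 4) 4).toNat ' '
    let o3 := pvOps.getD (PySem.Int.mod k 4).toNat ' '
    let total := pvEvalTriple o1 o2 o3
    if total = target then
      some (['4', ' '] ++ [o1] ++ [' ', '4', ' '] ++ [o2] ++ [' ', '4', ' ']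
              ++ [o3] ++ [' ', '4', ' ', '=', ' '] ++ PySem.Int.toChars total)
    else pvLoopK rest target

def arithmetic_alt (target : Int) : String :=
  ((pvLoopK (PySem.List.pyRange 0 64 1) target).map String.ofList).getD "no solution"

-- ===== PRECONDITION & SPEC =====
def Spec_arithmetic (target : Int) (out : String) : Prop := out = arithmetic_alt target
instance (target : Int) (out : String) : Decidable (Spec_arithmetic target out) := by unfold Spec_arithmetic; infer_instance

-- ===== CLAIM (what is proved, stated in full; the proofs are below) =====
def Claim_equal_arithmetic : Prop := ∀ (target : Int), Dom_arithmetic target → Spec_arithmetic target (arithmetic target)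

-- ===== LEMMAS AND PROOFS =====

-- ===== VERDICT (by name: the statement is the Claim_ definition above) =====
set_option maxRecDepth 8192 in
theorem arithmetic_spec : Claim_equal_arithmetic := by
  intro target _
  unfold Spec_arithmetic
  have hR : PySem.List.pyRange 0 64 1 = ([0, 1, 2, 3, 4, 5, 6, 7, 8, 9, 10, 11, 12, 13, 14, 15, 16, 17, 18, 19, 20, 21, 22, 23, 24, 25, 26, 27, 28, 29, 30, 31, 32, 33, 34, 35, 36, 37, 38, 39, 40, 41, 42, 43, 44, 45, 46, 47, 48, 49, 50, 51, 52, 53, 54, 55, 56, 57, 58, 59, 60, 61, 62, 63] : List Int) := by decide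
  by_cases h0 : (-60 : Int) = target
  · subst h0; rfl
  by_cases h1 : (-16 : Int) = target
  · subst h1; rfl
  by_cases h2 : (-15 : Int) = target
  · subst h2; rfl
  by_cases h3 : (-8 : Int) = target
  · subst h3; rfl
  by_cases h4 : (-7 : Int) = target
  · subst h4; rfl
  by_cases h5 : (-4 : Int) = target
  · subst h5; rfl
  by_cases h6 : (-1 : Int) = target
  · subst h6; rfl
  by_cases h7 : (0 : Int) = target
  · subst h7; rfl
  by_cases h8 : (1 : Int) = target
  · subst h8; rfl
  by_cases h9 : (2 : Int) = target
  · subst h9; rfl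
  by_cases h10 : (4 : Int) = target
  · subst h10; rfl
  by_cases h11 : (7 : Int) = target
  · subst h11; rfl
  by_cases h12 : (8 : Int) = target
  · subst h12; rfl
  by_cases h13 : (9 : Int) = target
  · subst h13; rfl
  by_cases h14 : (15 : Int) = target
  · subst h14; rfl
  by_cases h15 : (16 : Int) = target
  · subst h15; rfl
  by_cases h16 : (17 : Int) = target
  · subst h16; rfl
  by_cases h17 : (24 : Int) = target
  · subst h17; rfl
  by_cases h18 : (32 : Int) = target
  · subst h18; rfl
  by_cases h19 : (60 : Int) = target
  · subst h19; rfl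
  by_cases h20 : (68 : Int) = target
  · subst h20; rfl
  by_cases h21 : (256 : Int) = target
  · subst h21; rfl
  simp [arithmetic, arithmetic_alt, pvLoopA, pvLoopB, pvLoopC, pvTryTriple, pvLoopK, pvMulDivLoop, pvAddSubLoop, pvEvalTriple, pvOperator, pvGetNum, pvStrItem, pvOps, hR, PySem.Int.floordiv, PySem.Int.mod, h0, h1, h2, h3, h4, h5, h6, h7, h8, h9, h10, h11, h12, h13, h14, h15, h16, h17, h18, h19, h20, h21]
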